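-- pv_equiv track=rewrite | github.com/phaiel/familiar | docs/v3/scripts/analyze_snippet_usage_updated.py | find_transitive_field_issues
-- ===== SOURCE A (Python) =====
-- def find_transitive_field_issues(direct_used_snippets, snippet_deps, snippet_categories):
--     """Find fields that are only used transitively (optimization opportunities)"""
--     transitive_field_issues = set()
--
--     # Find all snippets reachable from direct usage
--     all_reachable = set(direct_used_snippets)
--     changed = True
--
--     while changed:
--         changed = False
--         for snippet in list(all_reachable):
--             for referenced in snippet_deps.get(snippet, set()):
--                 if referenced not in all_reachable:
--                     all_reachable.add(referenced)
--                     changed = True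
--                     # If it's a field reached transitively, flag it
--                     if snippet_categories.get(referenced) == "field" and referenced not in direct_used_snippets:
--                         transitive_field_issues.add(referenced)
--
--     return transitive_field_issues
-- ===== SOURCE B (Python) =====
-- def find_transitive_field_issues(direct_used_snippets, snippet_deps, snippet_categories):
--     """Frontier BFS: expand the newly-found layer each round (each dep list scanned
--     once), record discovered nodes, then flag fields in one final filter pass."""
--     seen = set()
--     frontier = []
--     for s in direct_used_snippets:
--         if s not in seen:
--             seen.add(s)
--             frontier.append(s)
--     found = []
--     while frontier:
--         fresh = []
--         for r in (x for s in frontier for x in snippet_deps.get(s, ())):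
--             if r not in seen:
--                 seen.add(r)
--                 fresh.append(r)
--         found += fresh
--         frontier = fresh
--     return {x for x in found if snippet_categories.get(x) == "field"}
-- ===== Notes on version B (the rewrite author's own statement) =====
-- stated objective: faster
-- what changed: A recomputes reachability by rescanning the entire reachable set in a fixpoint loop until nothing changes and flags fields inline; B expands only the newly-discovered frontier each round (so every dependency list is scanned once), records discovery order, and flags fields in a single final filter pass.
import Mathlib
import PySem

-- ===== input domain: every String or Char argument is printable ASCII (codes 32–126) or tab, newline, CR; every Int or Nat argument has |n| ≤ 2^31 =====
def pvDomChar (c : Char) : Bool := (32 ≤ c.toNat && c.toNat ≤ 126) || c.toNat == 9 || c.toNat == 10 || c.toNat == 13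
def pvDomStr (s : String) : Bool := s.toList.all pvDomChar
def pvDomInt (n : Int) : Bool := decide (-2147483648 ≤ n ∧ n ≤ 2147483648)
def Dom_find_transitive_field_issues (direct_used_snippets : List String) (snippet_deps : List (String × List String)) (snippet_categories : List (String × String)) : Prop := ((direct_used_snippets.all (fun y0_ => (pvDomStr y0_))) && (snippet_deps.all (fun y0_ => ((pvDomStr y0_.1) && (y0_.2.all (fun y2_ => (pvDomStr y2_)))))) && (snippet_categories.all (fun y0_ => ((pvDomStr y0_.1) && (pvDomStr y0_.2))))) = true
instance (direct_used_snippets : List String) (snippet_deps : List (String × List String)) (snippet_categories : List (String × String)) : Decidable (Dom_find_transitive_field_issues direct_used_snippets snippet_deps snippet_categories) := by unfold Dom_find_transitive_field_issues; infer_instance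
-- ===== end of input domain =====

-- B replaces A's repeated fixpoint rescans of the whole reachable set by a frontier
-- expansion (each dependency list scanned once) plus one final filter pass: faster.

-- ===== PORT A =====
-- inner loop body: 'for referenced in snippet_deps.get(snippet, set()): …'
-- state = (all_reachable, transitive_field_issues, changed)
def fti_stepA (direct : List String) (cats : List (String × String))
    (st : List String × List String × Bool) (r : String) : List String × List String × Bool :=
  if r ∈ st.1 then st
  else (st.1 ++ [r],
        if PySem.Dict.get? (PySem.Dict.mk cats) r = some "field" ∧ ¬ (r ∈ direct)
        then PySem.Set.add st.2.1 r else st.2.1,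
        true)

-- one snippet of the snapshot 'list(all_reachable)'
def fti_visitA (direct : List String) (deps : List (String × List String)) (cats : List (String × String))
    (st : List String × List String × Bool) (s : String) : List String × List String × Bool :=
  (PySem.Dict.getD (PySem.Dict.mk deps) s []).foldl (fti_stepA direct cats) st

-- 'while changed:' — fuel is a totality guard only; one unit per round, a changed round
-- adds at least one element, all elements come from the seeds and the dep lists.
def fti_loopA (direct : List String) (deps : List (String × List String)) (cats : List (String × String)) :
    Nat → List String → List String → List String
  | 0, _, issues => issues
  | fuel+1, reach, issues =>
    let p := reach.foldl (fti_visitA direct deps cats) (reach, issues, false)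
    if p.2.2 then fti_loopA direct deps cats fuel p.1 p.2.1 else p.2.1

def fti_sumDeps (deps : List (String × List String)) : Nat :=
  deps.foldl (fun n p => n + p.2.length) 0

def find_transitive_field_issues (direct_used_snippets : List String) (snippet_deps : List (String × List String)) (snippet_categories : List (String × String)) : List String :=
  fti_loopA direct_used_snippets snippet_deps snippet_categories
    (direct_used_snippets.length + fti_sumDeps snippet_deps + 1)
    (PySem.Set.ofList direct_used_snippets) []

-- ===== PORT B =====
-- 'if r not in seen: seen.add(r); fresh.append(r)' — state = (seen, fresh)
def fti_fresh (st : List String × List String) (r : String) : List String × List String :=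
  if r ∈ st.1 then st else (st.1 ++ [r], st.2 ++ [r])

-- the generator '(x for s in frontier for x in snippet_deps.get(s, ()))'
def fti_layer (deps : List (String × List String)) (frontier : List String) : List String :=
  frontier.flatMap (fun s => PySem.Dict.getD (PySem.Dict.mk deps) s [])

-- 'while frontier:' — fuel is a totality guard only (each round with a nonempty
-- fresh layer enlarges seen, which is bounded by the dep lists plus the seeds).
def fti_grow (deps : List (String × List String)) :
    Nat → List String → List String → List String → List String
  | 0, _, found, _ => found
  | _, _, found, [] => found
  | fuel+1, seen, found, frontier =>
    let p := (fti_layer deps frontier).foldl fti_fresh (seen, [])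
    fti_grow deps fuel p.1 (found ++ p.2) p.2

-- the category test of the final set comprehension
def fti_fld (cats : List (String × String)) (x : String) : Bool :=
  PySem.Dict.get? (PySem.Dict.mk cats) x == some "field"

def find_transitive_field_issues_alt (direct_used_snippets : List String) (snippet_deps : List (String × List String)) (snippet_categories : List (String × String)) : List String :=
  PySem.Set.ofList
    ((fti_grow snippet_deps (fti_sumDeps snippet_deps + 1)
        (PySem.Set.ofList direct_used_snippets) [] (PySem.Set.ofList direct_used_snippets)).filter
      (fti_fld snippet_categories))

-- ===== PRECONDITION & SPEC =====
def Spec_find_transitive_field_issues (direct_used_snippets : List String) (snippet_deps : List (String × List String)) (snippet_categories : List (String × String)) (out : List String) : Prop := out = find_transitive_field_issues_alt direct_used_snippets snippet_deps snippet_categories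
instance (direct_used_snippets : List String) (snippet_deps : List (String × List String)) (snippet_categories : List (String × String)) (out : List String) : Decidable (Spec_find_transitive_field_issues direct_used_snippets snippet_deps snippet_categories out) := by unfold Spec_find_transitive_field_issues; infer_instance

-- ===== CLAIM (what is proved, stated in full; the proofs are below) =====
def Claim_equal_find_transitive_field_issues : Prop := ∀ (direct_used_snippets : List String) (snippet_deps : List (String × List String)) (snippet_categories : List (String × String)), Dom_find_transitive_field_issues direct_used_snippets snippet_deps snippet_categories → Spec_find_transitive_field_issues direct_used_snippets snippet_deps snippet_categories (find_transitive_field_issues direct_used_snippets snippet_deps snippet_categories)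

-- ===== LEMMAS AND PROOFS =====

-- measure: dep-list occurrences not yet reached
def fti_m (deps : List (String × List String)) (seen : List String) : Nat :=
  ((deps.flatMap Prod.snd).filter (fun y => decide (y ∉ seen))).length

theorem fti_foldl_visitA (direct : List String) (deps : List (String × List String)) (cats : List (String × String)) :
    ∀ (xs : List String) (st : List String × List String × Bool),
      xs.foldl (fti_visitA direct deps cats) st = (fti_layer deps xs).foldl (fti_stepA direct cats) st := by
  intro xs
  induction xs with
  | nil => intro st; simp [fti_layer]
  | cons s ts ih =>
    intro st
    rw [List.foldl_cons, ih (fti_visitA direct deps cats st s)]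
    have hsplit : fti_layer deps (s :: ts) =
        PySem.Dict.getD (PySem.Dict.mk deps) s [] ++ fti_layer deps ts := by
      simp [fti_layer]
    rw [hsplit, List.foldl_append]
    rfl

theorem fti_idleA (direct : List String) (cats : List (String × String)) :
    ∀ (rs seen issues : List String) (b : Bool),
      (∀ r ∈ rs, r ∈ seen) →
      rs.foldl (fti_stepA direct cats) (seen, issues, b) = (seen, issues, b) := by
  intro rs
  induction rs with
  | nil => intro seen issues b _; simp
  | cons r ts ih =>
    intro seen issues b hall
    simp only [List.foldl_cons, fti_stepA, if_pos (hall r (List.mem_cons_self))]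
    exact ih seen issues b (fun x hx => hall x (List.mem_cons_of_mem _ hx))

theorem fti_fresh_acc :
    ∀ (rs seen nf : List String),
      rs.foldl fti_fresh (seen, nf) =
        ((rs.foldl fti_fresh (seen, [])).1, nf ++ (rs.foldl fti_fresh (seen, [])).2) := by
  intro rs
  induction rs with
  | nil => intro seen nf; simp
  | cons r ts ih =>
    intro seen nf
    by_cases h : r ∈ seen
    · simp only [List.foldl_cons, fti_fresh, if_pos h]
      exact ih seen nf
    · simp only [List.foldl_cons, fti_fresh, if_neg h, List.nil_append]
      rw [ih (seen ++ [r]) (nf ++ [r]), ih (seen ++ [r]) [r]]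
      simp

theorem fti_fresh_seen :
    ∀ (rs seen : List String),
      (rs.foldl fti_fresh (seen, [])).1 = seen ++ (rs.foldl fti_fresh (seen, [])).2 := by
  intro rs
  induction rs with
  | nil => intro seen; simp
  | cons r ts ih =>
    intro seen
    by_cases h : r ∈ seen
    · simp only [List.foldl_cons, fti_fresh, if_pos h]
      exact ih seen
    · simp only [List.foldl_cons, fti_fresh, if_neg h, List.nil_append]
      rw [fti_fresh_acc ts (seen ++ [r]) [r], ih (seen ++ [r])]
      simp

theorem fti_fresh_nodup :
    ∀ (rs : List String) (st : List String × List String),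
      st.1.Nodup → (rs.foldl fti_fresh st).1.Nodup := by
  intro rs
  induction rs with
  | nil => intro st h; exact h
  | cons r ts ih =>
    intro st h
    simp only [List.foldl_cons]
    by_cases hr : r ∈ st.1
    · simp only [fti_fresh, if_pos hr]; exact ih st h
    · simp only [fti_fresh, if_neg hr]
      refine ih _ ?_
      simp only [List.nodup_append]
      refine ⟨h, List.nodup_singleton r, ?_⟩
      intro a ha b hb
      rw [List.mem_singleton] at hb
      subst hb
      exact fun e => hr (e ▸ ha)

theorem fti_fresh_mem :
    ∀ (rs : List String) (st : List String × List String),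
      ∀ r, (r ∈ rs ∨ r ∈ st.1) → r ∈ (rs.foldl fti_fresh st).1 := by
  intro rs
  induction rs with
  | nil =>
    intro st r hr
    simp only [List.foldl_nil]
    rcases hr with h | h
    · simp at h
    · exact h
  | cons x ts ih =>
    intro st r hr
    simp only [List.foldl_cons]
    by_cases h : x ∈ st.1
    · simp only [fti_fresh, if_pos h]
      rcases hr with hr | hr
      · rcases List.mem_cons.mp hr with rfl | hr
        · exact ih st r (Or.inr h)
        · exact ih st r (Or.inl hr)
      · exact ih st r (Or.inr hr)
    · simp only [fti_fresh, if_neg h]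
      rcases hr with hr | hr
      · rcases List.mem_cons.mp hr with rfl | hr
        · exact ih _ r (Or.inr (by simp))
        · exact ih _ r (Or.inl hr)
      · exact ih _ r (Or.inr (by simp [hr]))

-- one round: A's inline flagging over rs equals B's fresh collection, with
-- the flagged set carried as 'found.filter (fti_fld cats)'
theorem fti_AB (direct : List String) (cats : List (String × String)) :
    ∀ (rs seen found : List String) (b : Bool),
      (∀ x ∈ direct, x ∈ seen) →
      (∀ x ∈ found, x ∈ seen) →
      rs.foldl (fti_stepA direct cats) (seen, found.filter (fti_fld cats), b) =
        ((rs.foldl fti_fresh (seen, [])).1,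
         (found ++ (rs.foldl fti_fresh (seen, [])).2).filter (fti_fld cats),
         b || !(rs.foldl fti_fresh (seen, [])).2.isEmpty) := by
  intro rs
  induction rs with
  | nil => intro seen found b _ _; simp
  | cons r ts ih =>
    intro seen found b hdir hfnd
    by_cases h : r ∈ seen
    · simp only [List.foldl_cons, fti_stepA, fti_fresh, if_pos h]
      exact ih seen found b hdir hfnd
    · have hnd : ¬ (r ∈ direct) := fun hd => h (hdir r hd)
      have hrfnd : r ∉ found.filter (fti_fld cats) := by
        intro hm
        exact h (hfnd r (List.mem_of_mem_filter hm))
      have hissue : (if PySem.Dict.get? (PySem.Dict.mk cats) r = some "field" ∧ ¬ (r ∈ direct)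
          then PySem.Set.add (found.filter (fti_fld cats)) r else found.filter (fti_fld cats))
          = (found ++ [r]).filter (fti_fld cats) := by
        by_cases hf : PySem.Dict.get? (PySem.Dict.mk cats) r = some "field"
        · rw [if_pos ⟨hf, hnd⟩]
          have : PySem.Set.add (found.filter (fti_fld cats)) r
              = found.filter (fti_fld cats) ++ [r] := by
            simp [PySem.Set.add, hrfnd]
          rw [this, List.filter_append]
          simp [fti_fld, hf]
        · rw [if_neg (fun hp => hf hp.1), List.filter_append]
          simp [fti_fld, hf]
      simp only [List.foldl_cons, fti_stepA, fti_fresh, if_neg h]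
      rw [hissue]
      rw [ih (seen ++ [r]) (found ++ [r]) true
            (fun x hx => List.mem_append_left _ (hdir x hx))
            (fun x hx => by
              rcases List.mem_append.mp hx with hx | hx
              · exact List.mem_append_left _ (hfnd x hx)
              · exact List.mem_append_right _ hx)]
      simp only [List.nil_append]
      rw [fti_fresh_acc ts (seen ++ [r]) [r]]
      simp

theorem fti_fresh_new_sub :
    ∀ (rs : List String) (st : List String × List String),
      ∀ x ∈ (rs.foldl fti_fresh st).2, x ∈ st.2 ∨ x ∈ rs := by
  intro rs
  induction rs with
  | nil => intro st x hx; exact Or.inl hx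
  | cons r ts ih =>
    intro st x hx
    simp only [List.foldl_cons] at hx
    by_cases h : r ∈ st.1
    · simp only [fti_fresh, if_pos h] at hx
      rcases ih st x hx with hx | hx
      · exact Or.inl hx
      · exact Or.inr (List.mem_cons_of_mem _ hx)
    · simp only [fti_fresh, if_neg h] at hx
      rcases ih _ x hx with hx | hx
      · rcases List.mem_append.mp hx with hx | hx
        · exact Or.inl hx
        · have : x = r := List.mem_singleton.mp hx
          exact Or.inr (this ▸ List.mem_cons_self)
      · exact Or.inr (List.mem_cons_of_mem _ hx)

theorem fti_getD_sub (deps : List (String × List String)) (s r : String)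
    (hr : r ∈ PySem.Dict.getD (PySem.Dict.mk deps) s []) : r ∈ deps.flatMap Prod.snd := by
  rw [PySem.Dict.getD_eq_get?_getD] at hr
  cases hg : PySem.Dict.get? (PySem.Dict.mk deps) s with
  | none => rw [hg] at hr; simp at hr
  | some v =>
    rw [hg] at hr
    simp only [Option.getD_some] at hr
    have hmem : (s, v) ∈ (PySem.Dict.mk deps).items := PySem.Dict.mem_items_of_get?_eq_some _ hg
    exact List.mem_flatMap.mpr ⟨(s, v), hmem, hr⟩

theorem fti_filter_le (p q : String → Bool) (h : ∀ y, p y = true → q y = true) :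
    ∀ (L : List String), (L.filter p).length ≤ (L.filter q).length := by
  intro L
  induction L with
  | nil => simp
  | cons a t ih =>
    by_cases hp : p a = true
    · simp [hp, h a hp]; omega
    · simp only [List.filter_cons]
      rw [if_neg (by simp [hp])]
      by_cases hq : q a = true
      · rw [if_pos (by simp [hq])]; simp; omega
      · rw [if_neg (by simp [hq])]; exact ih

theorem fti_filter_lt (p q : String → Bool) (h : ∀ y, p y = true → q y = true) :
    ∀ (L : List String) (x : String), x ∈ L → q x = true → p x = false →
      (L.filter p).length < (L.filter q).length := by
  intro L
  induction L with
  | nil => simp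
  | cons a t ih =>
    intro x hx hq hp
    rcases List.mem_cons.mp hx with rfl | hx
    · simp only [List.filter_cons]
      rw [if_neg (by simp [hp]), if_pos (by simp [hq])]
      have := fti_filter_le p q h t
      simp; omega
    · have := ih x hx hq hp
      simp only [List.filter_cons]
      by_cases hpa : p a = true
      · rw [if_pos (by simp [hpa]), if_pos (by simp [h a hpa])]; simpa using this
      · rw [if_neg (by simp [hpa])]
        by_cases hqa : q a = true
        · rw [if_pos (by simp [hqa])]; simp; omega
        · rw [if_neg (by simp [hqa])]; exact this

theorem fti_m_drop_one (deps : List (String × List String)) (seen : List String) (x : String)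
    (hU : x ∈ deps.flatMap Prod.snd) (hx : x ∉ seen) :
    fti_m deps (seen ++ [x]) < fti_m deps seen := by
  apply fti_filter_lt _ _ _ _ x hU (by simp [hx]) (by simp)
  intro y hy
  simp only [decide_eq_true_eq] at hy ⊢
  intro hmem
  exact hy (List.mem_append_left _ hmem)

theorem fti_m_drop (deps : List (String × List String)) :
    ∀ (nw seen : List String),
      (∀ x ∈ nw, x ∈ deps.flatMap Prod.snd ∧ x ∉ seen) → nw.Nodup →
      fti_m deps (seen ++ nw) + nw.length ≤ fti_m deps seen := by
  intro nw
  induction nw with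
  | nil => intro seen _ _; simp
  | cons x t ih =>
    intro seen hall hnd
    have hx := hall x List.mem_cons_self
    have h1 : fti_m deps (seen ++ [x]) < fti_m deps seen := fti_m_drop_one deps seen x hx.1 hx.2
    have h2 : fti_m deps ((seen ++ [x]) ++ t) + t.length ≤ fti_m deps (seen ++ [x]) := by
      apply ih
      · intro y hy
        refine ⟨(hall y (List.mem_cons_of_mem _ hy)).1, ?_⟩
        intro hmem
        rcases List.mem_append.mp hmem with hm | hm
        · exact (hall y (List.mem_cons_of_mem _ hy)).2 hm
        · have : y = x := List.mem_singleton.mp hm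
          exact (List.nodup_cons.mp hnd).1 (this ▸ hy)
      · exact (List.nodup_cons.mp hnd).2
    have heq : seen ++ x :: t = (seen ++ [x]) ++ t := by simp
    rw [heq]
    simp only [List.length_cons]
    omega

theorem fti_grow_nil (deps : List (String × List String)) (f : Nat) (seen found : List String) :
    fti_grow deps f seen found [] = found := by
  cases f <;> rfl

-- round-by-round alignment: A's fixpoint round over the whole reachable set
-- equals B's expansion of the current frontier
theorem fti_main (direct : List String) (deps : List (String × List String)) (cats : List (String × String)) :
    ∀ (fA fB : Nat) (seen found done frontier : List String),
      seen = done ++ frontier →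
      (∀ x ∈ direct, x ∈ seen) →
      seen.Nodup →
      (∀ x ∈ found, x ∈ seen) →
      found.Nodup →
      (∀ s ∈ done, ∀ r ∈ PySem.Dict.getD (PySem.Dict.mk deps) s [], r ∈ seen) →
      fti_m deps seen < fA →
      fti_m deps seen < fB →
      fti_loopA direct deps cats fA seen (found.filter (fti_fld cats)) =
        (fti_grow deps fB seen found frontier).filter (fti_fld cats) ∧
      (fti_grow deps fB seen found frontier).Nodup := by
  intro fA
  induction fA with
  | zero => intro fB seen found done frontier _ _ _ _ _ _ hmA _; omega
  | succ fA ih =>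
    intro fB seen found done frontier hseen hdir hnd hfnd hfndnd hclosed hmA hmB
    subst hseen
    cases frontier with
    | nil =>
      refine ⟨?_, by rw [fti_grow_nil]; exact hfndnd⟩
      rw [fti_grow_nil]
      have hid : ∀ r ∈ fti_layer deps (done ++ []), r ∈ done ++ [] := by
        intro r hr
        rcases List.mem_flatMap.mp hr with ⟨t, ht, hrt⟩
        exact hclosed t (by simpa using ht) r hrt
      have hA : (done ++ []).foldl (fti_visitA direct deps cats)
          (done ++ [], found.filter (fti_fld cats), false)
          = (done ++ [], found.filter (fti_fld cats), false) := by
        rw [fti_foldl_visitA]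
        exact fti_idleA direct cats _ _ _ _ hid
      show (let p := (done ++ []).foldl (fti_visitA direct deps cats)
              (done ++ [], found.filter (fti_fld cats), false)
            if p.2.2 then fti_loopA direct deps cats fA p.1 p.2.1 else p.2.1)
          = found.filter (fti_fld cats)
      rw [hA]
      rfl
    | cons fr frs =>
      obtain ⟨mB, rfl⟩ : ∃ mB, fB = mB + 1 := ⟨fB - 1, by omega⟩
      set F := (fti_layer deps (fr :: frs)).foldl fti_fresh (done ++ fr :: frs, []) with hFdef
      have hid : ∀ r ∈ fti_layer deps done, r ∈ done ++ fr :: frs := by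
        intro r hr
        rcases List.mem_flatMap.mp hr with ⟨t, ht, hrt⟩
        exact hclosed t ht r hrt
      have hA : (done ++ fr :: frs).foldl (fti_visitA direct deps cats)
          (done ++ fr :: frs, found.filter (fti_fld cats), false)
          = (F.1, (found ++ F.2).filter (fti_fld cats), false || !F.2.isEmpty) := by
        rw [fti_foldl_visitA]
        have hsplit : fti_layer deps (done ++ fr :: frs) =
            fti_layer deps done ++ fti_layer deps (fr :: frs) := by
          simp [fti_layer]
        rw [hsplit, List.foldl_append]
        rw [fti_idleA direct cats (fti_layer deps done) _ _ _ hid]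
        exact fti_AB direct cats (fti_layer deps (fr :: frs)) _ _ _ hdir hfnd
      have hstep : fti_loopA direct deps cats (fA + 1) (done ++ fr :: frs) (found.filter (fti_fld cats)) =
          (if (false || !F.2.isEmpty) = true
           then fti_loopA direct deps cats fA F.1 ((found ++ F.2).filter (fti_fld cats))
           else (found ++ F.2).filter (fti_fld cats)) := by
        show (let p := (done ++ fr :: frs).foldl (fti_visitA direct deps cats)
                (done ++ fr :: frs, found.filter (fti_fld cats), false)
              if p.2.2 then fti_loopA direct deps cats fA p.1 p.2.1 else p.2.1) = _
        rw [hA]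
      have hgrow : fti_grow deps (mB + 1) (done ++ fr :: frs) found (fr :: frs) =
          fti_grow deps mB F.1 (found ++ F.2) F.2 := rfl
      rw [hstep, hgrow]
      have hFseen : F.1 = (done ++ fr :: frs) ++ F.2 :=
        fti_fresh_seen (fti_layer deps (fr :: frs)) _
      cases hE : F.2 with
      | nil =>
        simp only [List.isEmpty_nil, Bool.not_true, Bool.or_false]
        rw [if_neg (by simp : ¬ (false = true)), fti_grow_nil]
        exact ⟨by simp, by simpa using hfndnd⟩
      | cons x xs =>
        simp only [List.isEmpty_cons, Bool.not_false, Bool.or_true, if_true]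
        rw [← hE]
        have hFnd : F.1.Nodup :=
          fti_fresh_nodup (fti_layer deps (fr :: frs)) (done ++ fr :: frs, []) hnd
        have hnds : ((done ++ fr :: frs) ++ F.2).Nodup := by rw [← hFseen]; exact hFnd
        have hsplitnd := List.nodup_append.mp hnds
        have hnew : ∀ y ∈ F.2, y ∈ deps.flatMap Prod.snd ∧ y ∉ done ++ fr :: frs := by
          intro y hy
          constructor
          · rcases fti_fresh_new_sub (fti_layer deps (fr :: frs)) (done ++ fr :: frs, []) y hy with h0 | h0
            · simp at h0
            · rcases List.mem_flatMap.mp h0 with ⟨t, ht, hyt⟩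
              exact fti_getD_sub deps t y hyt
          · intro hmem
            exact hsplitnd.2.2 y hmem y hy rfl
        have hdrop : fti_m deps ((done ++ fr :: frs) ++ F.2) + F.2.length ≤ fti_m deps (done ++ fr :: frs) :=
          fti_m_drop deps F.2 (done ++ fr :: frs) hnew hsplitnd.2.1
        have hlen : 1 ≤ F.2.length := by rw [hE]; simp
        have hmF : fti_m deps F.1 = fti_m deps ((done ++ fr :: frs) ++ F.2) := by rw [hFseen]
        apply ih mB F.1 (found ++ F.2) (done ++ fr :: frs) F.2 hFseen
        · intro y hy
          rw [hFseen]
          exact List.mem_append_left _ (hdir y hy)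
        · exact hFnd
        · intro y hy
          rw [hFseen]
          rcases List.mem_append.mp hy with hy | hy
          · exact List.mem_append_left _ (hfnd y hy)
          · exact List.mem_append_right _ hy
        · refine List.Nodup.append hfndnd hsplitnd.2.1 ?_
          intro y hy1 hy2
          exact (hnew y hy2).2 (hfnd y hy1)
        · intro t ht r hr
          rcases List.mem_append.mp ht with ht | ht
          · rw [hFseen]
            exact List.mem_append_left _ (hclosed t ht r hr)
          · exact fti_fresh_mem (fti_layer deps (fr :: frs)) (done ++ fr :: frs, []) r
              (Or.inl (List.mem_flatMap.mpr ⟨t, ht, hr⟩))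
        · omega
        · omega

-- fti_sumDeps is the length of all dependency lists put together
theorem fti_sumDeps_eq (deps : List (String × List String)) :
    ∀ n : Nat, deps.foldl (fun n p => n + p.2.length) n = n + (deps.flatMap Prod.snd).length := by
  induction deps with
  | nil => intro n; simp
  | cons p t ih => intro n; simp [ih]; omega

-- ===== VERDICT (by name: the statement is the Claim_ definition above) =====
theorem find_transitive_field_issues_spec : Claim_equal_find_transitive_field_issues := by
  intro direct deps cats _
  unfold Spec_find_transitive_field_issues find_transitive_field_issues find_transitive_field_issues_alt
  have hm1 : fti_m deps (PySem.Set.ofList direct) ≤ (deps.flatMap Prod.snd).length :=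
    List.length_filter_le _ _
  have hm2 : fti_sumDeps deps = (deps.flatMap Prod.snd).length := by
    simpa using fti_sumDeps_eq deps 0
  have hmain := fti_main direct deps cats
    (direct.length + fti_sumDeps deps + 1) (fti_sumDeps deps + 1)
    (PySem.Set.ofList direct) [] [] (PySem.Set.ofList direct)
    (by simp)
    (fun x hx => (PySem.Set.mem_ofList _ _).mpr hx)
    (PySem.Set.nodup_ofList direct)
    (by intro x hx; simp at hx)
    List.nodup_nil
    (by intro s hs; simp at hs)
    (by omega)
    (by omega)
  have hfilter : ([] : List String).filter (fti_fld cats) = [] := rfl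
  rw [hfilter] at hmain
  rw [hmain.1]
  have hnd : ((fti_grow deps (fti_sumDeps deps + 1) (PySem.Set.ofList direct) []
      (PySem.Set.ofList direct)).filter (fti_fld cats)).Nodup := hmain.2.filter _
  exact (PySem.Set.ofList_eq_self_of_nodup _ hnd).symm
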